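-- pv_equiv track=rewrite | github.com/chunkily/everybody_codes | quest19/part2.py | get_permissible_actions
-- ===== SOURCE A (Python) =====
-- def can_pass(current, height, size):
--     return current >= height and current < (height + size)
--
-- def can_pass_through_any(current, openings_at_position):
--     for height, size in openings_at_position:
--         if can_pass(current, height, size):
--             return True
--     return False
--
-- def get_permissible_actions(distance, current_height, openings_at_position):
--     height_without_flaps = current_height - distance
--     output = list()
--     for ascents in range(distance + 1):
--         # each ascent converts a downward move to upward so +2 height
--         height_at_opening = height_without_flaps + 2 * ascents
--         if can_pass_through_any(height_at_opening, openings_at_position):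
--             output.append((ascents, height_at_opening))
--     return output
-- ===== SOURCE B (Python) =====
-- def get_permissible_actions(distance, current_height, openings_at_position):
--     # Solve each opening for its ascent interval, sort by start, and sweep once.
--     base = current_height - distance
--     intervals = []
--     for height, size in openings_at_position:
--         lo = max(0, -((base - height) // 2))          # ceil((height - base) / 2)
--         hi = min(distance, (height + size - 1 - base) // 2)
--         if lo <= hi:
--             intervals.append((lo, hi))
--     intervals.sort(key=lambda iv: iv[0])
--     output = []
--     start = 0
--     for lo, hi in intervals:
--         for ascents in range(max(lo, start), hi + 1):
--             output.append((ascents, base + 2 * ascents))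
--         start = max(start, hi + 1)
--     return output
-- ===== Notes on version B (the rewrite author's own statement) =====
-- stated objective: faster
-- what changed: Instead of testing every ascent in 0..distance against every opening, B solves each opening for its closed ascent interval, sorts the intervals by start, and emits the covered ascents in one sweep.
import Mathlib
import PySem

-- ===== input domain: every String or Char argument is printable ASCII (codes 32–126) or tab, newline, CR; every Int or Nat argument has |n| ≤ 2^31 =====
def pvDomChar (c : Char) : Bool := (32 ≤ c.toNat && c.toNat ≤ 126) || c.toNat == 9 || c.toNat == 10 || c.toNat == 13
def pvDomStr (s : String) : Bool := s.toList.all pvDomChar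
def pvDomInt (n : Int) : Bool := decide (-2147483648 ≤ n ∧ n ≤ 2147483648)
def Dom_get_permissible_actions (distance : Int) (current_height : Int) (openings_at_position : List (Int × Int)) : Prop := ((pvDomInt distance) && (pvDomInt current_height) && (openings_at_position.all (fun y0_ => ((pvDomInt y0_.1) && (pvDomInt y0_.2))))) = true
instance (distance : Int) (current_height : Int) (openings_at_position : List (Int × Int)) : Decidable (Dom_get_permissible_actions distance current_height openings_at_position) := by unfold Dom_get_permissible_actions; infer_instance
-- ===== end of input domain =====

-- B replaces A's per-ascent scan over all openings by solving each opening for its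
-- ascent interval, sorting the intervals and emitting the covered ascents in one sweep
-- (objective: faster — asymptotically fewer steps when distance is large).

-- ===== PORT A =====
def can_pass (current : Int) (height : Int) (size : Int) : Bool :=
  decide (current ≥ height) && decide (current < height + size)

def can_pass_through_any (current : Int) (openings_at_position : List (Int × Int)) : Bool :=
  match openings_at_position with
  | [] => false
  | (height, size) :: rest =>
    if can_pass current height size then true
    else can_pass_through_any current rest

def get_permissible_actions (distance : Int) (current_height : Int) (openings_at_position : List (Int × Int)) : List (Int × Int) :=
  let height_without_flaps := current_height - distance
  (PySem.List.pyRange 0 (distance + 1) 1).foldl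
    (fun output ascents =>
      let height_at_opening := height_without_flaps + 2 * ascents
      if can_pass_through_any height_at_opening openings_at_position then
        output ++ [(ascents, height_at_opening)]
      else output) []

-- ===== PORT B =====
-- ascent interval of one opening, clipped to [0, distance]
def pvInterval (base : Int) (distance : Int) (p : Int × Int) : Int × Int :=
  (max 0 (-(PySem.Int.floordiv (base - p.1) 2)),
   min distance (PySem.Int.floordiv (p.1 + p.2 - 1 - base) 2))

-- one step of Source B's sweep loop: state = (output, start)
def pvSweepStep (base : Int) (st : List (Int × Int) × Int) (iv : Int × Int) : List (Int × Int) × Int :=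
  (st.1 ++ (PySem.List.pyRange (max iv.1 st.2) (iv.2 + 1) 1).map (fun a => (a, base + 2 * a)),
   max st.2 (iv.2 + 1))

def get_permissible_actions_alt (distance : Int) (current_height : Int) (openings_at_position : List (Int × Int)) : List (Int × Int) :=
  let base := current_height - distance
  let intervals := openings_at_position.foldl
    (fun acc p =>
      let iv := pvInterval base distance p
      if iv.1 ≤ iv.2 then acc ++ [iv] else acc) []
  let sortedIvs := PySem.List.sorted intervals (fun iv => iv.1) false
  (sortedIvs.foldl (pvSweepStep base) ([], 0)).1

-- ===== PRECONDITION & SPEC =====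
def Spec_get_permissible_actions (distance : Int) (current_height : Int) (openings_at_position : List (Int × Int)) (out : List (Int × Int)) : Prop := out = get_permissible_actions_alt distance current_height openings_at_position
instance (distance : Int) (current_height : Int) (openings_at_position : List (Int × Int)) (out : List (Int × Int)) : Decidable (Spec_get_permissible_actions distance current_height openings_at_position out) := by unfold Spec_get_permissible_actions; infer_instance

-- ===== CLAIM (what is proved, stated in full; the proofs are below) =====
def Claim_equal_get_permissible_actions : Prop := ∀ (distance : Int) (current_height : Int) (openings_at_position : List (Int × Int)), Dom_get_permissible_actions distance current_height openings_at_position → Spec_get_permissible_actions distance current_height openings_at_position (get_permissible_actions distance current_height openings_at_position)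

-- ===== LEMMAS AND PROOFS =====

lemma can_pass_through_any_iff (c : Int) (ops : List (Int × Int)) :
    can_pass_through_any c ops = true ↔ ∃ p ∈ ops, p.1 ≤ c ∧ c < p.1 + p.2 := by
  induction ops with
  | nil => simp [can_pass_through_any]
  | cons q t ih =>
    obtain ⟨h, s⟩ := q
    have hstep : can_pass_through_any c ((h, s) :: t) =
        if can_pass c h s then true else can_pass_through_any c t := rfl
    rw [hstep]
    by_cases hq : can_pass c h s = true
    · rw [if_pos hq]
      simp only [true_iff]
      refine ⟨(h, s), List.mem_cons_self, ?_⟩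
      simp only [can_pass, Bool.and_eq_true, decide_eq_true_eq, ge_iff_le] at hq
      exact ⟨hq.1, hq.2⟩
    · rw [if_neg hq, ih]
      constructor
      · rintro ⟨p, hp, h1, h2⟩; exact ⟨p, List.mem_cons_of_mem _ hp, h1, h2⟩
      · rintro ⟨p, hp, h1, h2⟩
        rcases List.mem_cons.mp hp with heq | hmem
        · exfalso; apply hq; subst heq
          simp only [can_pass, Bool.and_eq_true, decide_eq_true_eq, ge_iff_le]
          exact ⟨h1, h2⟩
        · exact ⟨p, hmem, h1, h2⟩

-- A is the filtered-range list
lemma A_char (distance current_height : Int) (ops : List (Int × Int)) :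
    get_permissible_actions distance current_height ops =
      ((PySem.List.pyRange 0 (distance + 1) 1).filter
          (fun a => can_pass_through_any (current_height - distance + 2 * a) ops)).map
        (fun a => (a, current_height - distance + 2 * a)) := by
  unfold get_permissible_actions
  rw [PySem.List.foldl_append_if
    (fun a => can_pass_through_any (current_height - distance + 2 * a) ops)
    (fun a => (a, current_height - distance + 2 * a))]
  simp

-- membership in one opening's clipped interval
lemma mem_interval_iff (base d : Int) (p : Int × Int) (a : Int) :
    ((pvInterval base d p).1 ≤ a ∧ a ≤ (pvInterval base d p).2) ↔
      (0 ≤ a ∧ a ≤ d ∧ p.1 ≤ base + 2 * a ∧ base + 2 * a < p.1 + p.2) := by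
  have h2 : (0:Int) < 2 := by norm_num
  simp only [pvInterval, PySem.Int.floordiv_eq_ediv_of_pos h2]
  omega

-- an input a is covered by some interval of l
def pvCovers (l : List (Int × Int)) (a : Int) : Prop := ∃ iv ∈ l, iv.1 ≤ a ∧ a ≤ iv.2

-- the sweep: folding pvSweepStep over a lo-sorted list of intervals with lo ≥ 0
lemma sweep_lemma (base : Int) :
    ∀ (l : List (Int × Int)) (out : List (Int × Int)) (start : Int) (C : Int → Prop),
      l.Pairwise (fun i j => i.1 ≤ j.1) →
      (∀ iv ∈ l, 0 ≤ iv.1) →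
      (∃ asc : List Int, out = asc.map (fun a => (a, base + 2 * a)) ∧
        asc.Pairwise (· < ·) ∧ (∀ a, a ∈ asc ↔ C a) ∧ (∀ a ∈ asc, a < start)) →
      (∀ a iv, iv ∈ l → iv.1 ≤ a → a < start → C a) →
      ∃ asc : List Int, (l.foldl (pvSweepStep base) (out, start)).1 =
          asc.map (fun a => (a, base + 2 * a)) ∧
        asc.Pairwise (· < ·) ∧ (∀ a, a ∈ asc ↔ C a ∨ pvCovers l a) := by
  intro l
  induction l with
  | nil =>
    intro out start C _ _ h3 _
    obtain ⟨asc, heq, hpw, hm, _⟩ := h3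
    exact ⟨asc, heq, hpw, fun a => by simp [pvCovers, hm a]⟩
  | cons iv t ih =>
    intro out start C h1 h2 h3 h5
    obtain ⟨lo, hi⟩ := iv
    obtain ⟨asc, heq, hpw, hmem, hlt⟩ := h3
    have hhead : ∀ j ∈ t, lo ≤ j.1 := by
      intro j hj; exact (List.pairwise_cons.mp h1).1 j hj
    have htail : t.Pairwise (fun i j => i.1 ≤ j.1) := (List.pairwise_cons.mp h1).2
    have hlo0 : 0 ≤ lo := h2 (lo, hi) List.mem_cons_self
    -- the new state after processing (lo, hi)
    simp only [List.foldl_cons]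
    have hstep :
        pvSweepStep base (out, start) (lo, hi) =
          (out ++ (PySem.List.pyRange (max lo start) (hi + 1) 1).map (fun a => (a, base + 2 * a)),
           max start (hi + 1)) := rfl
    rw [hstep]
    have := ih (out ++ (PySem.List.pyRange (max lo start) (hi + 1) 1).map (fun a => (a, base + 2 * a)))
      (max start (hi + 1)) (fun a => C a ∨ (lo ≤ a ∧ a ≤ hi)) htail
      (fun j hj => h2 j (List.mem_cons_of_mem _ hj)) ?_ ?_
    · obtain ⟨asc', heq', hpw', hmem'⟩ := this
      refine ⟨asc', heq', hpw', fun a => ?_⟩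
      rw [hmem' a]
      simp only [pvCovers, List.mem_cons]
      constructor
      · rintro ((hC | hiv) | ⟨j, hj, hja⟩)
        · exact Or.inl hC
        · exact Or.inr ⟨(lo, hi), Or.inl rfl, hiv.1, hiv.2⟩
        · exact Or.inr ⟨j, Or.inr hj, hja⟩
      · rintro (hC | ⟨j, (rfl | hj), hja⟩)
        · exact Or.inl (Or.inl hC)
        · exact Or.inl (Or.inr ⟨hja.1, hja.2⟩)
        · exact Or.inr ⟨j, hj, hja⟩
    · -- the extended output is still a sorted map with the extended coverage
      refine ⟨asc ++ PySem.List.pyRange (max lo start) (hi + 1) 1, by rw [heq, List.map_append], ?_, ?_, ?_⟩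
      · rw [List.pairwise_append]
        refine ⟨hpw, PySem.List.pairwise_lt_pyRange_one _ _, ?_⟩
        intro a ha b hb
        have hb' := PySem.List.mem_pyRange_one.mp hb
        have := hlt a ha
        omega
      · intro a
        rw [List.mem_append, hmem a, PySem.List.mem_pyRange_one]
        constructor
        · rintro (hC | hr)
          · exact Or.inl hC
          · exact Or.inr ⟨by omega, by omega⟩
        · rintro (hC | ⟨hla, hah⟩)
          · exact Or.inl hC
          · by_cases hs : a < start
            · exact Or.inl (h5 a (lo, hi) List.mem_cons_self hla hs)
            · exact Or.inr (by omega)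
      · intro a ha
        rcases List.mem_append.mp ha with h | h
        · have := hlt a h; omega
        · have := PySem.List.mem_pyRange_one.mp h; omega
    · -- every ascent below the new start reachable from a later interval is already covered
      intro a j hj hja hs
      by_cases hstart : a < start
      · exact Or.inl (h5 a j (List.mem_cons_of_mem _ hj) hja hstart)
      · have := hhead j hj
        exact Or.inr ⟨by omega, by omega⟩

-- iv ∈ B's interval list ↔ it is a nonempty clipped interval of some opening
lemma mem_intervals_iff (base d : Int) (ops : List (Int × Int)) (iv : Int × Int) :
    iv ∈ ops.foldl (fun acc p =>
        let j := pvInterval base d p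
        if j.1 ≤ j.2 then acc ++ [j] else acc) [] ↔
      ∃ p ∈ ops, (pvInterval base d p).1 ≤ (pvInterval base d p).2 ∧ iv = pvInterval base d p := by
  rw [PySem.List.foldl_append_ite (p := fun p => (pvInterval base d p).1 ≤ (pvInterval base d p).2)
    (f := fun p => pvInterval base d p)]
  simp only [List.nil_append, List.mem_map, List.mem_filter, decide_eq_true_eq]
  constructor
  · rintro ⟨p, ⟨hp, hle⟩, rfl⟩; exact ⟨p, hp, hle, rfl⟩
  · rintro ⟨p, hp, hle, rfl⟩; exact ⟨p, ⟨hp, hle⟩, rfl⟩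

-- two strictly increasing integer lists with the same members are equal
lemma eq_of_pairwise_lt_of_mem_iff :
    ∀ (l₁ l₂ : List Int), l₁.Pairwise (· < ·) → l₂.Pairwise (· < ·) →
      (∀ a, a ∈ l₁ ↔ a ∈ l₂) → l₁ = l₂ := by
  intro l₁
  induction l₁ with
  | nil =>
    intro l₂ _ _ hm
    cases l₂ with
    | nil => rfl
    | cons b t => exact absurd ((hm b).mpr List.mem_cons_self) (List.not_mem_nil)
  | cons a t ih =>
    intro l₂ h1 h2 hm
    cases l₂ with
    | nil => exact absurd ((hm a).mp List.mem_cons_self) (List.not_mem_nil)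
    | cons b u =>
      have hab : a = b := by
        have ha := (hm a).mp List.mem_cons_self
        have hb := (hm b).mpr List.mem_cons_self
        rcases List.mem_cons.mp ha with h | h
        · exact h
        · rcases List.mem_cons.mp hb with h' | h'
          · exact h'.symm
          · have := (List.pairwise_cons.mp h1).1 b h'
            have := (List.pairwise_cons.mp h2).1 a h
            omega
      subst hab
      have ht : t = u := by
        apply ih u (List.pairwise_cons.mp h1).2 (List.pairwise_cons.mp h2).2
        intro x
        constructor
        · intro hx
          have hax : a < x := (List.pairwise_cons.mp h1).1 x hx
          rcases List.mem_cons.mp ((hm x).mp (List.mem_cons_of_mem _ hx)) with h | h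
          · omega
          · exact h
        · intro hx
          have hax : a < x := (List.pairwise_cons.mp h2).1 x hx
          rcases List.mem_cons.mp ((hm x).mpr (List.mem_cons_of_mem _ hx)) with h | h
          · omega
          · exact h
      rw [ht]

-- ===== VERDICT (by name: the statement is the Claim_ definition above) =====
theorem get_permissible_actions_spec : Claim_equal_get_permissible_actions := by
  intro distance current_height ops _
  unfold Spec_get_permissible_actions
  set base := current_height - distance with hbase
  -- B's interval list and its sorted version
  set intervals := ops.foldl (fun acc p =>
      let j := pvInterval base distance p
      if j.1 ≤ j.2 then acc ++ [j] else acc) [] with hintervals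
  set sortedIvs := PySem.List.sorted intervals (fun iv => iv.1) false with hsorted
  have hperm : sortedIvs.Perm intervals := PySem.List.sorted_perm _ _ _
  have hpw : sortedIvs.Pairwise (fun i j => i.1 ≤ j.1) := PySem.List.sorted_pairwise _ _
  have hnonneg : ∀ iv ∈ sortedIvs, 0 ≤ iv.1 := by
    intro iv hiv
    have : iv ∈ intervals := hperm.mem_iff.mp hiv
    obtain ⟨p, _, _, rfl⟩ := (mem_intervals_iff base distance ops iv).mp this
    simp [pvInterval]
  -- run the sweep
  obtain ⟨ascB, heqB, hpwB, hmemB⟩ :=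
    sweep_lemma base sortedIvs [] 0 (fun _ => False) hpw hnonneg
      ⟨[], rfl, List.Pairwise.nil, by simp, by simp⟩
      (by intro a iv hiv h1 h2; have := hnonneg iv hiv; omega)
  -- characterize B's coverage
  have hcov : ∀ a, pvCovers sortedIvs a ↔
      (0 ≤ a ∧ a < distance + 1 ∧
        can_pass_through_any (base + 2 * a) ops = true) := by
    intro a
    rw [can_pass_through_any_iff]
    constructor
    · rintro ⟨iv, hiv, h1, h2⟩
      obtain ⟨p, hp, _, rfl⟩ := (mem_intervals_iff base distance ops iv).mp (hperm.mem_iff.mp hiv)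
      have := (mem_interval_iff base distance p a).mp ⟨h1, h2⟩
      exact ⟨by omega, by omega, ⟨p, hp, by omega, by omega⟩⟩
    · rintro ⟨h0, hd, p, hp, hl, hr⟩
      have hmem := (mem_interval_iff base distance p a).mpr ⟨h0, by omega, hl, hr⟩
      refine ⟨pvInterval base distance p, ?_, hmem.1, hmem.2⟩
      exact hperm.mem_iff.mpr ((mem_intervals_iff base distance ops _).mpr
        ⟨p, hp, by omega, rfl⟩)
  -- A as a filtered range
  rw [A_char]
  -- B's result
  show _ = (sortedIvs.foldl (pvSweepStep base) ([], 0)).1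
  rw [heqB]
  congr 1
  apply eq_of_pairwise_lt_of_mem_iff
  · exact (PySem.List.pairwise_lt_pyRange_one 0 (distance + 1)).filter _
  · exact hpwB
  · intro a
    rw [List.mem_filter, PySem.List.mem_pyRange_one, hmemB a, hcov a]
    simp only [false_or]
    tauto
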